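-- pv_equiv track=rewrite | github.com/BaBiLee/exercise-1 | q1.py | most_frequent_lengths
-- ===== SOURCE A (Python) =====
-- from typing import List
--
-- def most_frequent_lengths(strings: List[str]) -> List[str]:
--     length_counts = {}
--     for s in strings:
--         length = len(s)
--         if length in length_counts:
--             length_counts[length] += 1
--         else:
--             length_counts[length] = 1
--
--     max_frequency = max(length_counts.values())
--
--     most_frequent_lengths = [
--         length for length, count in length_counts.items() if count == max_frequency
--     ]
--
--     longest_frequent_length = max(most_frequent_lengths)
--
--     result = [s for s in strings if len(s) == longest_frequent_length]
--
--     return result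
-- ===== SOURCE B (Python) =====
-- from typing import List
--
-- def most_frequent_lengths(strings: List[str]) -> List[str]:
--     groups = {}
--     for s in strings:
--         groups.setdefault(len(s), []).append(s)
--     best = max(groups, key=lambda L: (len(groups[L]), L))
--     return groups[best]
-- ===== Notes on version B (the rewrite author's own statement) =====
-- stated objective: simpler
-- what changed: B buckets strings by length into a dict of lists in one pass and returns the winning bucket directly, picking the winner with a single lexicographic max over (count, length); A's separate values-max, key-filter, second max and final filter pass over all strings disappear.
import Mathlib
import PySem

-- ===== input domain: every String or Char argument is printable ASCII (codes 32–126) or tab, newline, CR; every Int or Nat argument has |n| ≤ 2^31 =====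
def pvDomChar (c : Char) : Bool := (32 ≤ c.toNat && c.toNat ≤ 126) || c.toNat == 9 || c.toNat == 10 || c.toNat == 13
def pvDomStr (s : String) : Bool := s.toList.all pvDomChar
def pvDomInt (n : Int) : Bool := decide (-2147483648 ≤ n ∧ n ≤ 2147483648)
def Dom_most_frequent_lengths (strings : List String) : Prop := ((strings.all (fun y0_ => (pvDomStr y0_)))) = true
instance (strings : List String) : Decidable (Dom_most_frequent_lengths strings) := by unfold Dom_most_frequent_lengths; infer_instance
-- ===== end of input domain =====

-- B buckets strings by length into a dict of lists in one pass and returns the winning bucket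
-- chosen by a single lexicographic max over (count, length), dropping A's filter/max/filter passes (objective: simpler).


-- ===== PORT A =====
def most_frequent_lengths (strings : List String) : List String :=
  let length_counts : PySem.Dict Int Int := strings.foldl
    (fun d s =>
      let length := PySem.Str.len s
      if d.contains length then d.insert length (d.getD length 0 + 1)
      else d.insert length 1)
    PySem.Dict.empty
  match PySem.List.max? length_counts.values (fun v => v) with
  | none => []   -- Python raises ValueError here (empty input); excluded by Pre_
  | some max_frequency =>
    let most_frequent := (length_counts.items.filter (fun p => p.2 == max_frequency)).map (fun p => p.1)
    match PySem.List.max? most_frequent (fun v => v) with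
    | none => []   -- unreachable: most_frequent is nonempty whenever the dict is
    | some longest_frequent_length =>
      strings.filter (fun s => PySem.Str.len s == longest_frequent_length)

-- ===== PORT B =====
def most_frequent_lengths_alt (strings : List String) : List String :=
  let groups : PySem.Dict Int (List String) := strings.foldl
    (fun d s => d.modify (PySem.Str.len s) [] (fun b => b ++ [s])) PySem.Dict.empty
  match PySem.List.max2? groups.keys
      (fun L => ((groups.getD L []).length : Int)) (fun L => L) with
  | none => []   -- Python raises ValueError here (empty input); excluded by Pre_
  | some best => groups.getD best []

-- ===== PRECONDITION & SPEC =====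
-- Pre_ excludes only the empty list, on which the Python A raises ValueError from max().
def Pre_most_frequent_lengths (strings : List String) : Prop := strings ≠ []
instance (strings : List String) : Decidable (Pre_most_frequent_lengths strings) := by unfold Pre_most_frequent_lengths; infer_instance
def pvWitness_most_frequent_lengths : List String := ["a"]

def Spec_most_frequent_lengths (strings : List String) (out : List String) : Prop := out = most_frequent_lengths_alt strings
instance (strings : List String) (out : List String) : Decidable (Spec_most_frequent_lengths strings out) := by unfold Spec_most_frequent_lengths; infer_instance

-- ===== CLAIM (what is proved, stated in full; the proofs are below) =====
def Claim_equal_most_frequent_lengths : Prop := ∀ (strings : List String), Dom_most_frequent_lengths strings → Pre_most_frequent_lengths strings → Spec_most_frequent_lengths strings (most_frequent_lengths strings)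

-- ===== LEMMAS AND PROOFS =====

-- A's counting loop builds exactly Counter(map(len, strings)).
theorem pv_counts_eq (strings : List String) :
    strings.foldl
      (fun d s =>
        let length := PySem.Str.len s
        if d.contains length then d.insert length (d.getD length 0 + 1)
        else d.insert length 1)
      PySem.Dict.empty
    = PySem.Dict.counter (strings.map PySem.Str.len) := by
  rw [PySem.List.foldl_congr_mem (g := fun d s => d.insert (PySem.Str.len s) (d.getD (PySem.Str.len s) 0 + 1))]
  · rw [← List.foldl_map (f := PySem.Str.len)
      (g := fun d x => PySem.Dict.insert d x (d.getD x 0 + 1))]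
    exact PySem.Dict.foldl_insert_getD_add_one_eq_counter _
  · intro d s _
    by_cases h : d.contains (PySem.Str.len s) = true
    · simp only [if_pos h]
    · have h' : d.contains (PySem.Str.len s) = false := by simpa using h
      rw [if_neg h, PySem.Dict.getD_of_not_contains d 0 h']
      norm_num

-- B's bucket at L is the ordered filter of strings with length L.
theorem pv_bucket_eq (strings : List String) (L : Int) :
    (strings.foldl (fun d s => d.modify (PySem.Str.len s) [] (fun b => b ++ [s]))
      PySem.Dict.empty).getD L []
    = strings.filter (fun s => PySem.Str.len s == L) := by
  rw [← List.foldl_map (f := fun s => (PySem.Str.len s, s))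
      (g := fun d p => PySem.Dict.modify d p.1 [] (fun b => b ++ [p.2]))]
  rw [PySem.Dict.getD_foldl_modify_append]
  simp [List.filter_map, Function.comp_def]

-- B's keys are the distinct lengths in first-occurrence order.
theorem pv_keys_eq (strings : List String) :
    (strings.foldl (fun d s => d.modify (PySem.Str.len s) [] (fun b => b ++ [s]))
      PySem.Dict.empty).keys
    = PySem.Set.ofList (strings.map PySem.Str.len) := by
  rw [PySem.Dict.keys_foldl_modify_key]
  simp [PySem.Set.update, PySem.Set.ofList_eq_foldl]

-- The size of a length-L bucket is the multiplicity of L among the lengths.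
theorem pv_len_filter (strings : List String) (L : Int) :
    (strings.filter (fun s => PySem.Str.len s == L)).length
      = (strings.map PySem.Str.len).count L := by
  induction strings with
  | nil => rfl
  | cons s t ih =>
    rw [List.map_cons, List.filter_cons, List.count_cons]
    by_cases h : (PySem.Str.len s == L) = true
    · rw [if_pos h, if_pos h, List.length_cons, ih]
    · rw [if_neg h, if_neg h, Nat.add_zero]
      exact ih

-- The step function of max2? (named so the fold invariant below can speak about it).
def pvStep (k1 : Int → Int) (acc : Option Int) (x : Int) : Option Int :=
  match acc with
  | none => some x
  | some m => if (decide (k1 m < k1 x) || !decide (k1 x < k1 m) && decide (m < x)) = true then some x else some m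

theorem pv_max2_eq_foldl (xs : List Int) (k1 : Int → Int) :
    PySem.List.max2? xs k1 (fun L => L) = xs.foldl (pvStep k1) none := by
  unfold PySem.List.max2?
  apply PySem.List.foldl_congr_mem
  intro acc x _
  cases acc <;> rfl

theorem pv_max2_aux (k1 : Int → Int) (t : List Int) :
    ∀ m : Int, ∃ m', t.foldl (pvStep k1) (some m) = some m' ∧
      (m' = m ∨ m' ∈ t) ∧
      (k1 m < k1 m' ∨ (k1 m = k1 m' ∧ m ≤ m')) ∧
      ∀ y ∈ t, k1 y < k1 m' ∨ (k1 y = k1 m' ∧ y ≤ m') := by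
  induction t with
  | nil => intro m; exact ⟨m, rfl, Or.inl rfl, Or.inr ⟨rfl, le_refl m⟩, by simp⟩
  | cons x t ih =>
    intro m
    rw [List.foldl_cons]
    by_cases hx : (decide (k1 m < k1 x) || !decide (k1 x < k1 m) && decide (m < x)) = true
    · simp only [Bool.or_eq_true, Bool.and_eq_true, Bool.not_eq_true', decide_eq_true_eq,
        decide_eq_false_iff_not] at hx
      have hstep : pvStep k1 (some m) x = some x := by
        simp only [pvStep]
        rw [if_pos (by simp only [Bool.or_eq_true, Bool.and_eq_true, Bool.not_eq_true',
          decide_eq_true_eq, decide_eq_false_iff_not]; exact hx)]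
      rw [hstep]
      obtain ⟨m', h1, h2, h3, h4⟩ := ih x
      refine ⟨m', h1, ?_, by omega, ?_⟩
      · rcases h2 with h | h
        · exact Or.inr (by simp [h])
        · exact Or.inr (by simp [h])
      · intro y hy
        rcases List.mem_cons.mp hy with rfl | hy
        · exact h3
        · exact h4 y hy
    · simp only [Bool.or_eq_true, Bool.and_eq_true, Bool.not_eq_true', decide_eq_true_eq,
        decide_eq_false_iff_not, not_or, not_and, not_lt] at hx
      have hstep : pvStep k1 (some m) x = some m := by
        simp only [pvStep]
        rw [if_neg (by simp only [Bool.or_eq_true, Bool.and_eq_true, Bool.not_eq_true',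
          decide_eq_true_eq, decide_eq_false_iff_not, not_or, not_and, not_lt]; exact hx)]
      rw [hstep]
      obtain ⟨m', h1, h2, h3, h4⟩ := ih m
      refine ⟨m', h1, ?_, h3, ?_⟩
      · rcases h2 with h | h
        · exact Or.inl h
        · exact Or.inr (by simp [h])
      · intro y hy
        rcases List.mem_cons.mp hy with rfl | hy
        · omega
        · exact h4 y hy

-- max2? with an injective second key returns a member lexicographically above every member.
theorem pv_max2_spec (xs : List Int) (k1 : Int → Int) (h : xs ≠ []) :
    ∃ m, PySem.List.max2? xs k1 (fun L => L) = some m ∧ m ∈ xs ∧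
      ∀ y ∈ xs, k1 y < k1 m ∨ (k1 y = k1 m ∧ y ≤ m) := by
  obtain ⟨x, t, rfl⟩ := List.exists_cons_of_ne_nil h
  rw [pv_max2_eq_foldl, List.foldl_cons]
  have hx : pvStep k1 none x = some x := rfl
  rw [hx]
  obtain ⟨m', h1, h2, h3, h4⟩ := pv_max2_aux k1 t x
  refine ⟨m', h1, ?_, ?_⟩
  · rcases h2 with h | h
    · simp [h]
    · simp [h]
  · intro y hy
    rcases List.mem_cons.mp hy with rfl | hy
    · exact h3
    · exact h4 y hy

-- ===== VERDICT (by name: the statement is the Claim_ definition above) =====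
theorem most_frequent_lengths_spec : Claim_equal_most_frequent_lengths := by
  intro strings _ hpre
  unfold Pre_most_frequent_lengths at hpre
  unfold Spec_most_frequent_lengths
  -- shared data
  have hLs : strings.map PySem.Str.len ≠ [] := by simpa using hpre
  obtain ⟨a, ha⟩ := List.exists_mem_of_ne_nil _ hLs
  have hKne : PySem.Set.ofList (strings.map PySem.Str.len) ≠ [] :=
    List.ne_nil_of_mem ((PySem.Set.mem_ofList _ a).mpr ha)
  -- the common count key
  set g : Int → Int := fun k => ((strings.map PySem.Str.len).count k : Int) with hg
  -- B's key function equals g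
  have hkey : (fun L : Int => (((strings.foldl (fun d s => d.modify (PySem.Str.len s) [] (fun b => b ++ [s]))
      PySem.Dict.empty).getD L []).length : Int)) = g := by
    funext L
    rw [pv_bucket_eq, pv_len_filter]
  -- B's winner
  obtain ⟨L', hL'eq, hL'mem, hL'max⟩ := pv_max2_spec (PySem.Set.ofList (strings.map PySem.Str.len)) g hKne
  have hB : most_frequent_lengths_alt strings
      = strings.filter (fun s => PySem.Str.len s == L') := by
    simp only [most_frequent_lengths_alt]
    rw [pv_keys_eq, hkey]
    split
    · next h => rw [hL'eq] at h; cases h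
    · next best h =>
        rw [hL'eq] at h
        injection h with h
        subst h
        exact pv_bucket_eq strings L'
  -- A's values are g over the distinct lengths
  have hvals : (PySem.Dict.counter (strings.map PySem.Str.len)).values
      = (PySem.Set.ofList (strings.map PySem.Str.len)).map g := by
    simp [PySem.Dict.values, PySem.Dict.items_counter, List.map_map, Function.comp_def, hg]
  have hvalne : (PySem.Set.ofList (strings.map PySem.Str.len)).map g ≠ [] := by
    simpa using hKne
  obtain ⟨M, hMeq⟩ : ∃ M, PySem.List.max? ((PySem.Set.ofList (strings.map PySem.Str.len)).map g) (fun v => v) = some M := by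
    cases h : PySem.List.max? ((PySem.Set.ofList (strings.map PySem.Str.len)).map g) (fun v => v) with
    | none => exact absurd ((PySem.List.max?_eq_none_iff _ _).mp h) hvalne
    | some M => exact ⟨M, rfl⟩
  have hMmem := PySem.List.max?_mem hMeq
  have hMmax := PySem.List.max?_isMax hMeq
  -- A's most_frequent list
  have hmfl : ((PySem.Dict.counter (strings.map PySem.Str.len)).items.filter (fun p => p.2 == M)).map (fun p => p.1)
      = (PySem.Set.ofList (strings.map PySem.Str.len)).filter (fun k => g k == M) := by
    rw [PySem.Dict.items_counter]
    rw [List.filter_map, List.map_map]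
    simp [Function.comp_def, hg]
  obtain ⟨k0, hk0K, hk0⟩ := List.mem_map.mp hMmem
  have hmflne : (PySem.Set.ofList (strings.map PySem.Str.len)).filter (fun k => g k == M) ≠ [] :=
    List.ne_nil_of_mem (List.mem_filter.mpr ⟨hk0K, by simp [hk0]⟩)
  obtain ⟨Lstar, hLeq⟩ : ∃ L, PySem.List.max? ((PySem.Set.ofList (strings.map PySem.Str.len)).filter (fun k => g k == M)) (fun v => v) = some L := by
    cases h : PySem.List.max? ((PySem.Set.ofList (strings.map PySem.Str.len)).filter (fun k => g k == M)) (fun v => v) with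
    | none => exact absurd ((PySem.List.max?_eq_none_iff _ _).mp h) hmflne
    | some L => exact ⟨L, rfl⟩
  have hLmem := PySem.List.max?_mem hLeq
  have hLmax := PySem.List.max?_isMax hLeq
  have hLstarK := (List.mem_filter.mp hLmem).1
  have hgstar : g Lstar = M := by
    have := (List.mem_filter.mp hLmem).2
    simpa using this
  -- A's result
  have hA : most_frequent_lengths strings
      = strings.filter (fun s => PySem.Str.len s == Lstar) := by
    simp only [most_frequent_lengths]
    rw [pv_counts_eq, hvals]
    split
    · next h => rw [hMeq] at h; cases h
    · next mf h =>
        rw [hMeq] at h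
        injection h with h
        subst h
        rw [hmfl]
        split
        · next h2 => rw [hLeq] at h2; cases h2
        · next lf h2 =>
            rw [hLeq] at h2
            injection h2 with h2
            subst h2
            rfl
  -- the two winners coincide
  have hgL' : g L' ≤ M := hMmax (g L') (List.mem_map_of_mem hL'mem)
  have h1 := hL'max Lstar hLstarK
  have hL'star : L' ≤ Lstar := by
    have hL'in : L' ∈ (PySem.Set.ofList (strings.map PySem.Str.len)).filter (fun k => g k == M) := by
      refine List.mem_filter.mpr ⟨hL'mem, ?_⟩
      simp only [beq_iff_eq]
      omega
    simpa using hLmax L' hL'in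
  have : Lstar = L' := by omega
  rw [hA, hB, this]
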